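-- pv_equiv track=rewrite | github.com/kingl0w/Vespra | gateway/worker-gateway.py | abi_encode_constructor
-- ===== SOURCE A (Python) =====
-- def abi_encode_constructor(name: str, symbol: str, total_supply_wei: int, decimals: int = 18) -> str:
--     """ABI-encode ERC-20 constructor arguments (name, symbol, totalSupply, decimals).
--
--     ERC-20 constructor signature: constructor(string name, string symbol, uint256 totalSupply, uint8 decimals)
--     ABI encoding layout (all values 32-byte aligned):
--       - offset to name string
--       - offset to symbol string
--       - totalSupply (uint256)
--       - decimals (uint8, padded to 32 bytes)
--       - name length + padded data
--       - symbol length + padded data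
--     """
--     def pad32(b: bytes) -> bytes:
--         """Pad bytes to next 32-byte boundary."""
--         rem = len(b) % 32
--         return b + (b'\x00' * (32 - rem)) if rem else b
--
--     def encode_uint256(n: int) -> bytes:
--         return n.to_bytes(32, 'big')
--
--     def encode_string(s: str) -> bytes:
--         encoded = s.encode('utf-8')
--         length = encode_uint256(len(encoded))
--         return length + pad32(encoded)
--
--     # Static slots: 4 params × 32 bytes = 128 bytes base offset
--     # name offset:         128 (0x80) — after all 4 static slots
--     # symbol offset:       128 + 32 + len(name_encoded)
--     name_bytes = name.encode('utf-8')
--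
--     name_encoded_len = 32 + (((len(name_bytes) - 1) // 32) + 1) * 32  # length word + padded data
--     symbol_offset = 128 + name_encoded_len
--
--     parts = [
--         encode_uint256(128),           # offset to name
--         encode_uint256(symbol_offset), # offset to symbol
--         encode_uint256(total_supply_wei),
--         encode_uint256(decimals),
--         encode_string(name),
--         encode_string(symbol),
--     ]
--     return ''.join(p.hex() for p in parts)
-- ===== SOURCE B (Python) =====
-- def abi_encode_constructor(name: str, symbol: str, total_supply_wei: int, decimals: int = 18) -> str:
--     """Generic head/tail ABI encoder: offsets come from the running tail length."""
--     def word(n: int) -> bytes: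
--         return n.to_bytes(32, 'big')
--
--     args = [('string', name), ('string', symbol), ('uint', total_supply_wei), ('uint', decimals)]
--     head_size = 32 * len(args)
--     head = b''
--     tail = b''
--     for kind, val in args:
--         if kind == 'string':
--             head += word(head_size + len(tail))
--             data = val.encode('utf-8')
--             tail += word(len(data)) + data + b'\x00' * (-len(data) % 32)
--         else:
--             head += word(val)
--     return (head + tail).hex()
-- ===== Notes on version B (the rewrite author's own statement) =====
-- stated objective: alternative
-- what changed: Replaced A's hard-coded parts list with closed-form ceiling arithmetic for the symbol offset by a generic head/tail ABI encoder that loops over argument descriptors, derives each dynamic offset from the running tail length, and hexes the single concatenated buffer.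
import Mathlib
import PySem

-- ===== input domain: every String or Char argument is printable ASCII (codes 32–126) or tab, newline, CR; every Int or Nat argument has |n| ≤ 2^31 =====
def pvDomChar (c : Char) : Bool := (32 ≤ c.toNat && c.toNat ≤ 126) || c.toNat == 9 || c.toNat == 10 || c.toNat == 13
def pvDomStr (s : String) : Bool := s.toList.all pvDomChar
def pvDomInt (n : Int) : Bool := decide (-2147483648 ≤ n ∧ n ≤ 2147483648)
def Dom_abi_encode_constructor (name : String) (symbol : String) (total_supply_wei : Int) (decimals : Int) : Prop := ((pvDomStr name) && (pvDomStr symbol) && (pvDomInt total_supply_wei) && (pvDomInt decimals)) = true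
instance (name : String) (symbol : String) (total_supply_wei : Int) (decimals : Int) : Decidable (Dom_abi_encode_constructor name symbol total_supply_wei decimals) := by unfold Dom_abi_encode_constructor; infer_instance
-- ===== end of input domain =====

-- B rewrites A as a generic head/tail ABI encoder over a descriptor list, deriving string
-- offsets from the running tail length instead of A's hard-coded closed-form offset arithmetic
-- (objective: alternative decomposition, same cost). Return value only; neither mutates arguments.

-- Shared hand-ports of Python library primitives (exact on the admitted domain):
-- n.to_bytes(32, 'big') — exact for 0 ≤ n < 2^256 (Pre_ + Dom guarantee this here)
def pvToBytes32 (n : Int) : List Nat := (List.range 32).map (fun i => n.toNat / 256 ^ (31 - i) % 256)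
-- s.encode('utf-8') — exact for ASCII strings (all code points < 128, guaranteed by Dom)
def pvUtf8 (s : String) : List Nat := s.toList.map Char.toNat
-- bytes.hex()
def pvHexDigit (n : Nat) : Char := Char.ofNat (if n < 10 then 48 + n else 87 + n)
def pvBytesHex (bs : List Nat) : List Char := bs.flatMap (fun b => [pvHexDigit (b / 16), pvHexDigit (b % 16)])

-- ===== PORT A =====
-- pad32: pad bytes to next 32-byte boundary
def pvPad32A (b : List Nat) : List Nat :=
  let rem := b.length % 32
  if rem ≠ 0 then b ++ List.replicate (32 - rem) 0 else b

-- encode_string: length word + padded utf-8 data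
def pvEncodeStringA (s : String) : List Nat :=
  let encoded := pvUtf8 s
  pvToBytes32 (encoded.length : Int) ++ pvPad32A encoded

def abi_encode_constructor (name : String) (symbol : String) (total_supply_wei : Int) (decimals : Int) : String :=
  let name_bytes := pvUtf8 name
  let name_encoded_len : Int := 32 + ((PySem.Int.floordiv ((name_bytes.length : Int) - 1) 32) + 1) * 32
  let symbol_offset : Int := 128 + name_encoded_len
  let parts : List (List Nat) :=
    [ pvToBytes32 128,
      pvToBytes32 symbol_offset,
      pvToBytes32 total_supply_wei,
      pvToBytes32 decimals,
      pvEncodeStringA name,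
      pvEncodeStringA symbol ]
  String.ofList ((parts.map pvBytesHex).flatten)   -- ''.join(p.hex() for p in parts)

-- ===== PORT B =====
-- argument descriptors: ('string', s) ↦ Sum.inl s, ('uint', n) ↦ Sum.inr n
def abi_encode_constructor_alt (name : String) (symbol : String) (total_supply_wei : Int) (decimals : Int) : String :=
  let args : List (String ⊕ Int) := [Sum.inl name, Sum.inl symbol, Sum.inr total_supply_wei, Sum.inr decimals]
  let head_size : Int := 32 * args.length
  let ht := args.foldl (fun (acc : List Nat × List Nat) a =>
    match a with
    | Sum.inl s =>
        let data := pvUtf8 s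
        ( acc.1 ++ pvToBytes32 (head_size + (acc.2.length : Int)),
          acc.2 ++ pvToBytes32 (data.length : Int) ++ data
                ++ List.replicate (PySem.Int.mod (-(data.length : Int)) 32).toNat 0 )
    | Sum.inr v => (acc.1 ++ pvToBytes32 v, acc.2)) ([], [])
  String.ofList (pvBytesHex (ht.1 ++ ht.2))

-- ===== PRECONDITION & SPEC =====
-- Pre_ excludes negative totalSupply/decimals, on which A's int.to_bytes raises OverflowError (B raises too).
def Pre_abi_encode_constructor (name : String) (symbol : String) (total_supply_wei : Int) (decimals : Int) : Prop :=
  0 ≤ total_supply_wei ∧ 0 ≤ decimals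
instance (name : String) (symbol : String) (total_supply_wei : Int) (decimals : Int) : Decidable (Pre_abi_encode_constructor name symbol total_supply_wei decimals) := by unfold Pre_abi_encode_constructor; infer_instance

def pvWitness_abi_encode_constructor : String × String × Int × Int := ("Token", "TKN", 1000000, 18)

def Spec_abi_encode_constructor (name : String) (symbol : String) (total_supply_wei : Int) (decimals : Int) (out : String) : Prop := out = abi_encode_constructor_alt name symbol total_supply_wei decimals
instance (name : String) (symbol : String) (total_supply_wei : Int) (decimals : Int) (out : String) : Decidable (Spec_abi_encode_constructor name symbol total_supply_wei decimals out) := by unfold Spec_abi_encode_constructor; infer_instance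

-- ===== CLAIM (what is proved, stated in full; the proofs are below) =====
def Claim_equal_abi_encode_constructor : Prop := ∀ (name : String) (symbol : String) (total_supply_wei : Int) (decimals : Int), Dom_abi_encode_constructor name symbol total_supply_wei decimals → Pre_abi_encode_constructor name symbol total_supply_wei decimals → Spec_abi_encode_constructor name symbol total_supply_wei decimals (abi_encode_constructor name symbol total_supply_wei decimals)

-- ===== LEMMAS AND PROOFS =====

theorem pvBytesHex_append (a b : List Nat) : pvBytesHex (a ++ b) = pvBytesHex a ++ pvBytesHex b := by
  simp [pvBytesHex]

-- A's padding equals B's "data ++ zeros((-len) % 32)" padding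
theorem pvPad32A_eq (b : List Nat) :
    pvPad32A b = b ++ List.replicate (PySem.Int.mod (-(b.length : Int)) 32).toNat 0 := by
  unfold pvPad32A
  rw [PySem.Int.mod_eq_emod_of_pos (by norm_num : (0:Int) < 32)]
  by_cases h : b.length % 32 = 0
  · have h0 : ((-(b.length : Int)) % 32).toNat = 0 := by omega
    simp [h, h0]
  · have : ((-(b.length : Int)) % 32).toNat = 32 - b.length % 32 := by omega
    simp [this, h]

theorem length_pvToBytes32 (n : Int) : (pvToBytes32 n).length = 32 := by
  simp [pvToBytes32]

-- ===== VERDICT (by name: the statement is the Claim_ definition above) =====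
theorem abi_encode_constructor_spec : Claim_equal_abi_encode_constructor := by
  intro name symbol t d _ _
  unfold Spec_abi_encode_constructor abi_encode_constructor abi_encode_constructor_alt pvEncodeStringA
  simp only [List.foldl, List.map, List.flatten, List.length, List.append_assoc, List.nil_append,
    pvBytesHex_append, pvPad32A_eq, List.append_eq, length_pvToBytes32, List.length_append,
    List.length_replicate]
  norm_num [List.append_nil]
  congr 5
  omega
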